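-- pv_equiv track=rewrite | github.com/theorem46/Yang-Mills-Mass-Gap | 3-Quantum Reconsitution/exp_quant_45_dimensional stress.py | RL2
-- ===== SOURCE A (Python) =====
-- def idx2(i, j, N):
--     return i * N + j
--
-- def RL2(N):
--     M = N * N
--     L = [[0] * M for _ in range(M)]
--     for i in range(N):
--         for j in range(N):
--             p = idx2(i, j, N)
--             L[p][p] = 4
--             L[p][idx2((i + 1) % N, j, N)] -= 1
--             L[p][idx2((i - 1) % N, j, N)] -= 1
--             L[p][idx2(i, (j + 1) % N, N)] -= 1
--             L[p][idx2(i, (j - 1) % N, N)] -= 1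
--     return L
-- ===== SOURCE B (Python) =====
-- def RL2(N):
--     # 1D periodic Laplacian L1 (N x N), built by accumulation so small-N
--     # collapses (N=1, N=2) are exact.
--     L1 = [[0] * N for _ in range(N)]
--     for i in range(N):
--         L1[i][i] += 2
--         L1[i][(i + 1) % N] -= 1
--         L1[i][(i - 1) % N] -= 1
--     # 2D Laplacian as the Kronecker sum L1 (x) I + I (x) L1.
--     M = N * N
--     L = [[0] * M for _ in range(M)]
--     for i in range(N):
--         for j in range(N):
--             L[i * N + j] = [(L1[i][k] if j == l else 0) + (L1[j][l] if i == k else 0)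
--                             for k in range(N) for l in range(N)]
--     return L
-- ===== Notes on version B (the rewrite author's own statement) =====
-- stated objective: alternative
-- what changed: B first builds the 1D periodic Laplacian L1 by accumulation and then fills each row of the N^2 x N^2 result as the Kronecker sum L1⊗I + I⊗L1 (two table lookups per entry), instead of A's per-site writes of four neighbour offsets into a preallocated matrix.
import Mathlib
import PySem

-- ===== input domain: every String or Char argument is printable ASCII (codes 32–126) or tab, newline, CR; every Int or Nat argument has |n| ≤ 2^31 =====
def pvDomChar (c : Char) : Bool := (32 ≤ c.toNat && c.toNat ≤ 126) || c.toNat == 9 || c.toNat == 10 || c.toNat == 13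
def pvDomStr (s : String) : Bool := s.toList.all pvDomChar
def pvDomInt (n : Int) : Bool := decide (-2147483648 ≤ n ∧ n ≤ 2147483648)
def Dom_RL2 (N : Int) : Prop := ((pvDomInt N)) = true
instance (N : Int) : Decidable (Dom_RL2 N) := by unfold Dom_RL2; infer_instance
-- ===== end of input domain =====

-- B builds the 1D periodic Laplacian L1 by accumulation and fills each row of the
-- N^2 x N^2 result as the Kronecker sum L1⊗I + I⊗L1 (two table lookups per entry),
-- instead of A's four neighbour-offset writes per site (objective: alternative).

-- ===== PORT A =====
def idx2 (i j N : Int) : Int := i * N + j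

-- Python 'L[p][q] = v' / 'L[p][q] -= 1'; exact for the indices these loops
-- produce (always nonnegative and in range).
def pySetAt (L : List (List Int)) (p q : Int) (v : Int) : List (List Int) :=
  L.modify p.toNat (fun row => row.set q.toNat v)
def pyDecAt (L : List (List Int)) (p q : Int) : List (List Int) :=
  L.modify p.toNat (fun row => row.modify q.toNat (fun x => x - 1))

def stepA (N : Int) (L : List (List Int)) (i j : Int) : List (List Int) :=
  let p := idx2 i j N
  let L1 := pySetAt L p p 4
  let L2 := pyDecAt L1 p (idx2 (PySem.Int.mod (i + 1) N) j N)
  let L3 := pyDecAt L2 p (idx2 (PySem.Int.mod (i - 1) N) j N)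
  let L4 := pyDecAt L3 p (idx2 i (PySem.Int.mod (j + 1) N) N)
  pyDecAt L4 p (idx2 i (PySem.Int.mod (j - 1) N) N)

def RL2 (N : Int) : List (List Int) :=
  let M := N * N
  let L0 := (PySem.List.pyRange 0 M 1).map (fun _ => PySem.List.pyRepeat [(0 : Int)] M)
  (PySem.List.pyRange 0 N 1).foldl (fun L i =>
    (PySem.List.pyRange 0 N 1).foldl (fun L j => stepA N L i j) L) L0

-- ===== PORT B =====
def stepL1 (N : Int) (L1 : List (List Int)) (i : Int) : List (List Int) :=
  let A := L1.modify i.toNat (fun row => row.modify i.toNat (fun x => x + 2))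
  let B := A.modify i.toNat (fun row => row.modify (PySem.Int.mod (i + 1) N).toNat (fun x => x - 1))
  B.modify i.toNat (fun row => row.modify (PySem.Int.mod (i - 1) N).toNat (fun x => x - 1))

def buildL1 (N : Int) : List (List Int) :=
  (PySem.List.pyRange 0 N 1).foldl (stepL1 N)
    ((PySem.List.pyRange 0 N 1).map (fun _ => PySem.List.pyRepeat [(0 : Int)] N))

def rowB (N : Int) (L1 : List (List Int)) (i j : Int) : List Int :=
  (PySem.List.pyRange 0 N 1).flatMap (fun k =>
    (PySem.List.pyRange 0 N 1).map (fun l =>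
      (if j = l then PySem.List.pyGetD (PySem.List.pyGetD L1 i []) k 0 else 0)
      + (if i = k then PySem.List.pyGetD (PySem.List.pyGetD L1 j []) l 0 else 0)))

def RL2_alt (N : Int) : List (List Int) :=
  let L1 := buildL1 N
  let M := N * N
  let L0 := (PySem.List.pyRange 0 M 1).map (fun _ => PySem.List.pyRepeat [(0 : Int)] M)
  (PySem.List.pyRange 0 N 1).foldl (fun L i =>
    (PySem.List.pyRange 0 N 1).foldl (fun L j =>
      L.set (i * N + j).toNat (rowB N L1 i j)) L) L0

-- ===== PRECONDITION & SPEC =====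
def Spec_RL2 (N : Int) (out : List (List Int)) : Prop := out = RL2_alt N
instance (N : Int) (out : List (List Int)) : Decidable (Spec_RL2 N out) := by unfold Spec_RL2; infer_instance

-- ===== CLAIM (what is proved, stated in full; the proofs are below) =====
def Claim_equal_RL2 : Prop := ∀ (N : Int), Dom_RL2 N → Spec_RL2 N (RL2 N)

-- ===== LEMMAS AND PROOFS =====

-- Nat-level descriptions of the index arithmetic and of the matrices built.
def succn (n i : Nat) : Nat := if i + 1 = n then 0 else i + 1
def predn (n i : Nat) : Nat := if i = 0 then n - 1 else i - 1
def l1e (n i k : Nat) : Int :=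
  (if i = k then 2 else 0) - (if succn n i = k then 1 else 0) - (if predn n i = k then 1 else 0)
def L1can (n : Nat) : List (List Int) := (List.range n).map (fun i => (List.range n).map (l1e n i))
def Ent (n i j q : Nat) : Int :=
  (if j = q % n then l1e n i (q / n) else 0) + (if i = q / n then l1e n j (q % n) else 0)
def Zmat (n : Nat) : List (List Int) := (List.range (n * n)).map (fun _ => List.replicate (n * n) (0 : Int))
def gA (n : Nat) (a : List (List Int)) (p : Nat) : List (List Int) :=
  stepA (n : Int) a ((p / n : Nat) : Int) ((p % n : Nat) : Int)
def gB (n : Nat) (a : List (List Int)) (p : Nat) : List (List Int) :=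
  a.set ((((p / n : Nat) : Int)) * (n : Int) + ((p % n : Nat) : Int)).toNat
    (rowB (n : Int) (buildL1 (n : Int)) ((p / n : Nat) : Int) ((p % n : Nat) : Int))

lemma succn_lt {n i : Nat} (h : i < n) : succn n i < n := by unfold succn; split <;> omega
lemma predn_lt {n i : Nat} (h : i < n) : predn n i < n := by unfold predn; split <;> omega

lemma mod_succ {n i : Nat} (hn : 0 < n) (hi : i < n) :
    PySem.Int.mod ((i : Int) + 1) (n : Int) = ((succn n i : Nat) : Int) := by
  rw [PySem.Int.mod_eq_emod_of_pos (by exact_mod_cast hn)]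
  unfold succn
  split_ifs with h
  · rw [show ((i : Int) + 1) = (n : Int) by omega, Int.emod_self]; simp
  · rw [Int.emod_eq_of_lt (by omega) (by omega)]; omega

lemma mod_pred {n i : Nat} (hn : 0 < n) (hi : i < n) :
    PySem.Int.mod ((i : Int) - 1) (n : Int) = ((predn n i : Nat) : Int) := by
  rw [PySem.Int.mod_eq_emod_of_pos (by exact_mod_cast hn)]
  unfold predn
  split_ifs with h
  · rw [show ((i : Int) - 1) = ((n : Int) - 1) + (n : Int) * (-1) by omega,
        Int.add_mul_emod_self_left, Int.emod_eq_of_lt (by omega) (by omega)]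
    omega
  · rw [Int.emod_eq_of_lt (by omega) (by omega)]; omega

lemma toNat_idx (a b n : Nat) : ((a : Int) * (n : Int) + (b : Int)).toNat = a * n + b := by
  rw [show (a : Int) * (n : Int) + (b : Int) = ((a * n + b : Nat) : Int) by push_cast; ring,
      Int.toNat_natCast]

lemma pair_inj {n a b c d : Nat} (hb : b < n) (hd : d < n) :
    a * n + b = c * n + d ↔ a = c ∧ b = d := by
  constructor
  · intro h
    have hn : 0 < n := by omega
    have ha : a = c := by
      have h1 := congrArg (fun x => x / n) h
      simpa [Nat.mul_comm, Nat.mul_add_div hn, Nat.div_eq_of_lt hb, Nat.div_eq_of_lt hd] using h1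
    subst ha
    exact ⟨rfl, by omega⟩
  · rintro ⟨rfl, rfl⟩; rfl

lemma modify_modify_same {α : Type} (l : List α) (i : Nat) (f g : α → α) :
    (l.modify i f).modify i g = l.modify i (fun x => g (f x)) := by
  apply List.ext_getElem
  · simp
  · intro k h1 h2
    simp only [List.getElem_modify]
    split <;> rfl

lemma foldl_double_range {α : Type} (n : Nat) (g : α → Nat → Nat → α) :
    ∀ (m : Nat) (init : α),
      (List.range m).foldl (fun a i => (List.range n).foldl (fun a j => g a i j) a) init
        = (List.range (m * n)).foldl (fun a p => g a (p / n) (p % n)) init := by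
  intro m
  induction m with
  | zero => intro init; simp
  | succ m ih =>
    intro init
    rw [List.range_succ, List.foldl_append,
        show (m + 1) * n = m * n + n by ring, List.range_add, List.foldl_append,
        List.foldl_map]
    simp only [List.foldl_cons, List.foldl_nil]
    rw [ih]
    apply PySem.List.foldl_congr_mem
    intro a j hj
    have hjn : j < n := List.mem_range.mp hj
    have hd : (m * n + j) / n = m := by
      rw [Nat.mul_comm m n, Nat.mul_add_div (by omega)]
      simp [Nat.div_eq_of_lt hjn]
    have hm : (m * n + j) % n = j := by
      rw [Nat.mul_comm m n, Nat.mul_add_mod]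
      exact Nat.mod_eq_of_lt hjn
    rw [hd, hm]

lemma flatMap_double_range {α : Type} (n : Nat) (f : Nat → Nat → α) :
    ∀ (m : Nat),
      (List.range m).flatMap (fun k => (List.range n).map (f k))
        = (List.range (m * n)).map (fun q => f (q / n) (q % n)) := by
  intro m
  induction m with
  | zero => simp
  | succ m ih =>
    rw [List.range_succ, List.flatMap_append, ih,
        show (m + 1) * n = m * n + n by ring, List.range_add, List.map_append]
    congr 1
    simp only [List.flatMap_cons, List.flatMap_nil, List.append_nil, List.map_map]
    apply List.map_congr_left
    intro j hj
    have hjn : j < n := List.mem_range.mp hj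
    have hd : (m * n + j) / n = m := by
      rw [Nat.mul_comm m n, Nat.mul_add_div (by omega)]
      simp [Nat.div_eq_of_lt hjn]
    have hm : (m * n + j) % n = j := by
      rw [Nat.mul_comm m n, Nat.mul_add_mod]
      exact Nat.mod_eq_of_lt hjn
    simp [Function.comp, hd, hm]


lemma pull_sub (c : Prop) [Decidable c] (x : Int) :
    (if c then x - 1 else x) = x - (if c then 1 else 0) := by split_ifs <;> ring

lemma ite_sub_distrib (a : Prop) [Decidable a] (x y z : Int) :
    (if a then x - y - z else (0 : Int)) = (if a then x else 0) - (if a then y else 0) - (if a then z else 0) := by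
  split_ifs <;> ring

lemma ite_ite_collapse (a b : Prop) [Decidable a] [Decidable b] (v : Int) :
    (if a then (if b then v else 0) else (0 : Int)) = if b ∧ a then v else 0 := by
  split_ifs <;> tauto

lemma threshold_set {α : Type} (m t : Nat) (F : Nat → α) (z : α) :
    ((List.range m).map (fun i => if i < t then F i else z)).set t (F t)
      = (List.range m).map (fun i => if i < t + 1 then F i else z) := by
  apply List.ext_getElem
  · simp
  · intro r h1 h2
    simp only [List.getElem_set, List.getElem_map, List.getElem_range]
    rcases eq_or_ne t r with rfl | hne
    · simp
    · rw [if_neg hne]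
      have : (r < t) ↔ (r < t + 1) := by omega
      simp only [this]

lemma stepL1_row (n t : Nat) :
    (((List.replicate n (0 : Int)).modify t (fun x => x + 2)).modify (succn n t) (fun x => x - 1)).modify
        (predn n t) (fun x => x - 1)
      = (List.range n).map (l1e n t) := by
  apply List.ext_getElem
  · simp
  · intro q h1 h2
    rw [List.getElem_map, List.getElem_range]
    simp only [List.getElem_modify, List.getElem_replicate]
    simp only [l1e]
    split_ifs <;> omega

lemma buildL1_spec (n : Nat) (hn : 0 < n) : buildL1 (n : Int) = L1can n := by
  simp only [buildL1]
  rw [PySem.List.pyRange_one]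
  simp only [Int.sub_zero, Int.toNat_natCast, List.foldl_map, List.map_map, zero_add,
    PySem.List.pyRepeat_singleton, Function.comp_def]
  have main : ∀ t, t ≤ n →
      (List.range t).foldl (fun L (k : Nat) => stepL1 (n : Int) L (k : Int))
          ((List.range n).map (fun _ => List.replicate n (0 : Int)))
        = (List.range n).map (fun i => if i < t then (List.range n).map (l1e n i) else List.replicate n (0 : Int)) := by
    intro t
    induction t with
    | zero => intro _; simp
    | succ t ih =>
      intro ht
      rw [List.range_succ, List.foldl_append, List.foldl_cons, List.foldl_nil, ih (by omega)]
      have htn : t < n := by omega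
      unfold stepL1
      simp only [Int.toNat_natCast, mod_succ hn htn, mod_pred hn htn]
      simp only [modify_modify_same]
      have hlen : t < ((List.range n).map
          (fun i => if i < t then (List.range n).map (l1e n i) else List.replicate n (0 : Int))).length := by
        simpa using htn
      rw [List.modify_eq_set_get _ hlen, List.get_eq_getElem, List.getElem_map, List.getElem_range,
        if_neg (lt_irrefl t)]
      rw [← threshold_set n t (fun i => (List.range n).map (l1e n i)) (List.replicate n (0 : Int))]
      congr 1
      simpa using stepL1_row n t
  rw [main n le_rfl]
  unfold L1can
  apply List.map_congr_left
  intro i hmem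
  rw [if_pos (List.mem_range.mp hmem)]

lemma rowB_eq (n i j : Nat) (_hn : 0 < n) (hi : i < n) (hj : j < n) :
    rowB (n : Int) (L1can n) (i : Int) (j : Int) = (List.range (n * n)).map (Ent n i j) := by
  simp only [rowB]
  rw [PySem.List.pyRange_one]
  simp only [Int.sub_zero, Int.toNat_natCast, List.flatMap_map, List.map_map, zero_add,
    Function.comp_def]
  have hgets : ∀ a b : Nat, a < n → b < n →
      PySem.List.pyGetD (PySem.List.pyGetD (L1can n) (a : Int) []) (b : Int) 0 = l1e n a b := by
    intro a b ha hb
    simp only [PySem.List.pyGetD_natCast]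
    unfold L1can
    rw [PySem.List.getD_map_range _ _ _ _ ha, PySem.List.getD_map_range _ _ _ _ hb]
  trans ((List.range n).flatMap (fun k => (List.range n).map (fun l =>
        (if j = l then l1e n i k else 0) + (if i = k then l1e n j l else 0))))
  · apply List.flatMap_congr
    intro k hk
    apply List.map_congr_left
    intro l hl
    rw [hgets i k hi (List.mem_range.mp hk), hgets j l hj (List.mem_range.mp hl)]
    simp only [Nat.cast_inj]
  · rw [flatMap_double_range n (fun k l => (if j = l then l1e n i k else 0) + (if i = k then l1e n j l else 0)) n]
    apply List.map_congr_left
    intro q _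
    simp only [Ent]

set_option maxHeartbeats 1000000 in
lemma rowA_eq (n i j : Nat) (hn : 0 < n) (_hi : i < n) (hj : j < n) :
    ((((((List.replicate (n * n) (0 : Int)).set (i * n + j) 4).modify (succn n i * n + j) (fun x => x - 1)).modify
        (predn n i * n + j) (fun x => x - 1)).modify (i * n + succn n j) (fun x => x - 1)).modify
        (i * n + predn n j) (fun x => x - 1))
      = (List.range (n * n)).map (Ent n i j) := by
  apply List.ext_getElem
  · simp
  · intro q h1 h2
    have hq : q < n * n := by simpa using h2
    have hkl : n * (q / n) + q % n = q := Nat.div_add_mod q n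
    have hl : q % n < n := Nat.mod_lt _ hn
    have hk : q / n < n := (Nat.div_lt_iff_lt_mul hn).mpr (by omega)
    have key : ∀ a b : Nat, b < n → (a * n + b = q ↔ (a = q / n ∧ b = q % n)) := by
      intro a b hb
      constructor
      · intro h
        rw [← hkl, Nat.mul_comm n (q / n)] at h
        exact (pair_inj hb hl).mp h
      · rintro ⟨rfl, rfl⟩
        rw [Nat.mul_comm]; exact hkl
    have e1 := key i j hj
    have e2 := key (succn n i) j hj
    have e3 := key (predn n i) j hj
    have e4 : (i * n + succn n j = q) ↔ (succn n j = q % n ∧ i = q / n) := by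
      rw [key i (succn n j) (succn_lt hj)]; tauto
    have e5 : (i * n + predn n j = q) ↔ (predn n j = q % n ∧ i = q / n) := by
      rw [key i (predn n j) (predn_lt hj)]; tauto
    simp only [List.getElem_modify, List.getElem_set, List.getElem_replicate,
      List.getElem_map, List.getElem_range]
    simp only [e1, e2, e3, e4, e5]
    simp only [pull_sub, Ent, l1e, ite_sub_distrib, ite_ite_collapse]
    split_ifs <;> omega

lemma stepA_eq (n i j : Nat) (hn : 0 < n) (hi : i < n) (hj : j < n)
    (L : List (List Int)) (hz : L[(i * n + j)]? = some (List.replicate (n * n) (0 : Int))) :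
    stepA (n : Int) L (i : Int) (j : Int) = L.set (i * n + j) ((List.range (n * n)).map (Ent n i j)) := by
  obtain ⟨hlt, hval⟩ := List.getElem?_eq_some_iff.mp hz
  simp only [stepA, pySetAt, pyDecAt, idx2]
  rw [mod_succ hn hi, mod_pred hn hi, mod_succ hn hj, mod_pred hn hj]
  simp only [toNat_idx]
  simp only [modify_modify_same]
  rw [List.modify_eq_set_get _ hlt]
  congr 1
  rw [List.get_eq_getElem, hval]
  simpa using rowA_eq n i j hn hi hj

lemma main_ind (n : Nat) (hn : 0 < n) :
    ∀ t, t ≤ n * n →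
      ((List.range t).foldl (gA n) (Zmat n) = (List.range t).foldl (gB n) (Zmat n))
      ∧ (∀ p, t ≤ p → p < n * n →
          ((List.range t).foldl (gA n) (Zmat n))[p]? = some (List.replicate (n * n) (0 : Int))) := by
  intro t
  induction t with
  | zero =>
    intro _
    refine ⟨rfl, ?_⟩
    intro p _ hp2
    simp only [List.range_zero, List.foldl_nil, Zmat]
    rw [List.getElem?_map, List.getElem?_range hp2]
    rfl
  | succ t ih =>
    intro ht1
    obtain ⟨hEq, hZ⟩ := ih (by omega)
    have ht : t < n * n := by omega
    have hi : t / n < n := (Nat.div_lt_iff_lt_mul hn).mpr (by omega)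
    have hj : t % n < n := Nat.mod_lt _ hn
    have hp : (t / n) * n + t % n = t := by
      rw [Nat.mul_comm]; exact Nat.div_add_mod t n
    have hrow := hZ t le_rfl ht
    have hA : gA n ((List.range t).foldl (gA n) (Zmat n)) t
        = ((List.range t).foldl (gA n) (Zmat n)).set t ((List.range (n * n)).map (Ent n (t / n) (t % n))) := by
      unfold gA
      rw [stepA_eq n (t / n) (t % n) hn hi hj _ (by rw [hp]; exact hrow), hp]
    have hB : gB n ((List.range t).foldl (gB n) (Zmat n)) t
        = ((List.range t).foldl (gB n) (Zmat n)).set t ((List.range (n * n)).map (Ent n (t / n) (t % n))) := by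
      unfold gB
      rw [toNat_idx, hp, buildL1_spec n hn, rowB_eq n (t / n) (t % n) hn hi hj]
    rw [List.range_succ, List.foldl_append, List.foldl_append, List.foldl_cons, List.foldl_cons,
      List.foldl_nil, List.foldl_nil]
    refine ⟨?_, ?_⟩
    · rw [hA, hB, hEq]
    · intro p hp1 hp2
      rw [hA, List.getElem?_set_ne (by omega : t ≠ p)]
      exact hZ p (by omega) hp2

-- ===== VERDICT (by name: the statement is the Claim_ definition above) =====
lemma RL2_fold (n : Nat) :
    RL2 (n : Int) = (List.range (n * n)).foldl (gA n) (Zmat n) := by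
  simp only [RL2]
  rw [show ((n : Int) * n) = ((n * n : Nat) : Int) by push_cast; ring]
  rw [PySem.List.pyRange_one ((0 : Int)) ((n * n : Nat) : Int),
      PySem.List.pyRange_one ((0 : Int)) ((n : Nat) : Int)]
  simp only [Int.sub_zero, Int.toNat_natCast, List.foldl_map, List.map_map, zero_add,
    PySem.List.pyRepeat_singleton, Function.comp_def]
  rw [foldl_double_range n (fun a i j => stepA (n : Int) a (i : Int) (j : Int)) n]
  rfl

lemma RL2_alt_fold (n : Nat) :
    RL2_alt (n : Int) = (List.range (n * n)).foldl (gB n) (Zmat n) := by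
  simp only [RL2_alt]
  rw [show ((n : Int) * n) = ((n * n : Nat) : Int) by push_cast; ring]
  rw [PySem.List.pyRange_one ((0 : Int)) ((n * n : Nat) : Int),
      PySem.List.pyRange_one ((0 : Int)) ((n : Nat) : Int)]
  simp only [Int.sub_zero, Int.toNat_natCast, List.foldl_map, List.map_map, zero_add,
    PySem.List.pyRepeat_singleton, Function.comp_def]
  exact foldl_double_range n
    (fun a i j => a.set ((i : Int) * (n : Int) + (j : Int)).toNat (rowB (n : Int) (buildL1 (n : Int)) (i : Int) (j : Int))) n
    ((List.range (n * n)).map (fun _ => List.replicate (n * n) (0 : Int)))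

theorem RL2_spec : Claim_equal_RL2 := by
  intro N _
  unfold Spec_RL2
  rcases (by omega : N ≤ 0 ∨ 0 < N) with hN | hN
  · simp only [RL2, RL2_alt, buildL1, PySem.List.pyRange_one_eq_nil hN, List.foldl_nil]
  · obtain ⟨n, rfl⟩ : ∃ n : Nat, N = (n : Int) := ⟨N.toNat, (Int.toNat_of_nonneg (by omega)).symm⟩
    have hn : 0 < n := by exact_mod_cast hN
    rw [RL2_fold n, RL2_alt_fold n]
    exact (main_ind n hn (n * n) le_rfl).1
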